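-- pv_equiv track=rewrite | github.com/OrderFromChaos/ICPC | aoc/4.py | adjacentpair
-- ===== SOURCE A (Python) =====
-- def adjacentpair(n):
--     s = str(n)
--     d = [int(x) for x in s]
--     count = dict()
--     for i, digit in enumerate(d[1:]):
--         if digit == d[i]:
--             if digit in count:
--                 count[digit] += 1
--             else:
--                 count[digit] = 1
--     return any([x == 1 for x in count.values()])
-- ===== SOURCE B (Python) =====
-- def adjacentpair(n):
--     d = [int(x) for x in str(n)]
--     counts = {}
--     i = 0
--     while i < len(d):
--         j = i + 1
--         while j < len(d) and d[j] == d[i]: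
--             j += 1
--         if j - i > 1:
--             counts[d[i]] = counts.get(d[i], 0) + (j - i - 1)
--         i = j
--     return any(v == 1 for v in counts.values())
-- ===== Notes on version B (the rewrite author's own statement) =====
-- stated objective: alternative
-- what changed: A counts matching neighbour comparisons one index at a time into a dict with an explicit contains-check; B instead scans maximal runs of equal digits (two-pointer run-length grouping) and adds L-1 pairs per run, then checks whether any digit's pair total is exactly 1.
import Mathlib
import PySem

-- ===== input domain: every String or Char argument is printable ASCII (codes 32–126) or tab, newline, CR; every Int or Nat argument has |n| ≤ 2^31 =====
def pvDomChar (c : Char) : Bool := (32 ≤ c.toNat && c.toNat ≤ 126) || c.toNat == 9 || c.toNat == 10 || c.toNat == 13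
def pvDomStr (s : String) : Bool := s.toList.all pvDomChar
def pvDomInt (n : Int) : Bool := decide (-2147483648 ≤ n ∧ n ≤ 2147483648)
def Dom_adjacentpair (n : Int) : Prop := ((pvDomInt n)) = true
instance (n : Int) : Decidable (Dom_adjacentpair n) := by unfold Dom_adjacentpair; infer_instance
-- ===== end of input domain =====

-- B replaces A's per-neighbour enumerate/index loop with run-length grouping (each maximal run
-- of L equal digits contributes L-1 pairs); objective: alternative decomposition, same cost.

-- ===== PORT A =====
def adjacentpair (n : Int) : Bool :=
  let s := PySem.Int.toStr n
  -- d = [int(x) for x in s]; int('-') raises ValueError, excluded by Pre_ (0 ≤ n),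
  -- so under Pre_ the .getD 0 default is never taken
  let d : List Int := s.toList.map (fun x => (PySem.Int.ofChars? [x]).getD 0)
  let count : PySem.Dict Int Int :=
    (PySem.List.enumerate (PySem.List.slice d (some 1) none) 0).foldl
      (fun (c : PySem.Dict Int Int) (p : Int × Int) =>
        if p.2 == PySem.List.pyGetD d p.1 0 then
          if c.contains p.2 then c.insert p.2 (c.getD p.2 0 + 1) else c.insert p.2 1
        else c)
      PySem.Dict.empty
  (count.values.map (fun x => x == 1)).any id

-- ===== PORT B =====
-- B's outer/inner while loops: each outer step consumes one maximal run (the inner while is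
-- the forward scan over equal digits) and yields (digit, run length)
def pvRuns : List Int → List (Int × Nat)
  | [] => []
  | x :: xs =>
      (x, (xs.takeWhile (fun y => y == x)).length + 1) ::
        pvRuns (xs.dropWhile (fun y => y == x))
termination_by l => l.length
decreasing_by
  simpa using Nat.lt_succ_of_le (List.length_dropWhile_le _ _)

def adjacentpair_alt (n : Int) : Bool :=
  let d : List Int := (PySem.Int.toStr n).toList.map (fun x => (PySem.Int.ofChars? [x]).getD 0)
  let counts : PySem.Dict Int Int :=
    (pvRuns d).foldl
      (fun (c : PySem.Dict Int Int) (r : Int × Nat) =>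
        if r.2 > 1 then c.insert r.1 (c.getD r.1 0 + ((r.2 : Int) - 1)) else c)
      PySem.Dict.empty
  counts.values.any (fun v => v == 1)

-- ===== PRECONDITION & SPEC =====
-- str(n) of a negative n starts with '-', and int('-') raises ValueError in both A and B:
-- Pre_ excludes exactly the negative inputs, on which the Python A raises.
def Pre_adjacentpair (n : Int) : Prop := 0 ≤ n
instance (n : Int) : Decidable (Pre_adjacentpair n) := by unfold Pre_adjacentpair; infer_instance
def pvWitness_adjacentpair : Int := 112345

def Spec_adjacentpair (n : Int) (out : Bool) : Prop := out = adjacentpair_alt n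
instance (n : Int) (out : Bool) : Decidable (Spec_adjacentpair n out) := by unfold Spec_adjacentpair; infer_instance

-- ===== CLAIM (what is proved, stated in full; the proofs are below) =====
def Claim_equal_adjacentpair : Prop := ∀ (n : Int), Dom_adjacentpair n → Pre_adjacentpair n → Spec_adjacentpair n (adjacentpair n)

-- ===== LEMMAS AND PROOFS =====

-- the digits both ports compute (syntactically the same expression in both)
def pvDigits (n : Int) : List Int :=
  (PySem.Int.toStr n).toList.map (fun x => (PySem.Int.ofChars? [x]).getD 0)

-- the right digits of the matching adjacent pairs, in order
def pvMatched (d : List Int) : List Int :=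
  ((d.zip d.tail).filter (fun q => q.2 == q.1)).map (·.2)

-- A's enumerate/index loop = fold over the adjacent-pair zip
theorem pv_foldl_enum {σ : Type} (upd : σ → Int → σ) :
    ∀ (zs : List Int) (k : Nat) (d : List Int), d.drop k = zs → ∀ (c : σ),
      (PySem.List.enumerate zs.tail (k : Int)).foldl
          (fun c p => if p.2 == PySem.List.pyGetD d p.1 0 then upd c p.2 else c) c
        = (zs.zip zs.tail).foldl (fun c q => if q.2 == q.1 then upd c q.2 else c) c := by
  intro zs
  induction zs with
  | nil => intro k d h c; simp
  | cons a zs' ih =>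
    intro k d h c
    cases zs' with
    | nil => simp
    | cons b zs'' =>
      have hd : d.getD k 0 = a := by
        have : (List.drop k d)[0]? = d[k+0]? := List.getElem?_drop
        simp [h] at this
        simp [List.getD_eq_getElem?_getD, this.symm]
      have hdrop : d.drop (k+1) = b :: zs'' := by
        have : (List.drop k d).tail = List.drop (k+1) d := List.tail_drop
        rw [h] at this
        simpa using this.symm
      have := ih (k+1) d hdrop
      simp only [List.tail_cons, PySem.List.enumerate_cons, List.foldl_cons, List.zip_cons_cons]
      rw [PySem.List.pyGetD_natCast, hd]
      have hc := this (if (b == a) = true then upd c b else c)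
      push_cast at hc ⊢
      rw [show PySem.List.enumerate (b :: zs'').tail ((k:Int) + 1) = PySem.List.enumerate zs'' ((k:Int)+1) from rfl] at hc
      simpa using hc

-- every run has length ≥ 1
theorem pvRuns_pos : ∀ (d : List Int), ∀ r ∈ pvRuns d, 1 ≤ r.2 := by
  intro d
  induction d using pvRuns.induct with
  | case1 => simp [pvRuns]
  | case2 x xs ih =>
    intro r hr
    rw [pvRuns] at hr
    rcases List.mem_cons.mp hr with h | h
    · subst h; simp
    · exact ih r h

-- a maximal run prefix of length t+1 contributes exactly t matched pairs
theorem pv_matched_cons_run : ∀ (t : List Int) (r : List Int) (x : Int),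
    (∀ y ∈ t, y = x) → (∀ h : r ≠ [], r.head h ≠ x) →
    pvMatched (x :: (t ++ r)) = List.replicate t.length x ++ pvMatched r := by
  intro t
  induction t with
  | nil =>
    intro r x _ hr
    cases r with
    | nil => simp [pvMatched]
    | cons h r' =>
      have : h ≠ x := hr (by simp)
      simp [pvMatched, this]
  | cons y t' ih =>
    intro r x ht hr
    have hy : y = x := ht y (by simp)
    subst hy
    have := ih r y (fun z hz => ht z (by simp [hz])) hr
    simp only [pvMatched, List.cons_append, List.tail_cons, List.zip_cons_cons,
      List.filter_cons, beq_self_eq_true] at this ⊢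
    simp [this, List.replicate_succ]

-- the matched-pair digits are exactly (length − 1) copies of each run's digit
theorem pv_matched_runs : ∀ (d : List Int),
    pvMatched d = (pvRuns d).flatMap (fun r => List.replicate (r.2 - 1) r.1) := by
  intro d
  induction d using pvRuns.induct with
  | case1 => simp [pvRuns, pvMatched]
  | case2 x xs ih =>
    rw [pvRuns]
    have hsplit : xs = xs.takeWhile (fun y => y == x) ++ xs.dropWhile (fun y => y == x) :=
      (List.takeWhile_append_dropWhile).symm
    have ht : ∀ y ∈ xs.takeWhile (fun y => y == x), y = x := by
      intro y hy
      simpa using List.mem_takeWhile_imp hy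
    have hr : ∀ h : (xs.dropWhile (fun y => y == x)) ≠ [],
        (xs.dropWhile (fun y => y == x)).head h ≠ x := by
      intro h
      have := List.head_dropWhile_not (fun y => y == x) h
      simpa using this
    calc pvMatched (x :: xs)
        = pvMatched (x :: (xs.takeWhile (fun y => y == x) ++ xs.dropWhile (fun y => y == x))) := by
          rw [← hsplit]
      _ = List.replicate (xs.takeWhile (fun y => y == x)).length x
            ++ pvMatched (xs.dropWhile (fun y => y == x)) := pv_matched_cons_run _ _ _ ht hr
      _ = _ := by rw [ih]; simp

-- any(v == 1 for v in d.values()) in terms of keys/getD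
theorem pv_any_values (d : PySem.Dict Int Int) (hn : d.keys.Nodup) :
    (d.values.any (fun v => v == 1)) = true ↔ ∃ k ∈ d.keys, d.getD k 0 = 1 := by
  have hv : d.values = d.items.map (·.2) := rfl
  have hk : d.keys = d.items.map (·.1) := rfl
  rw [List.any_eq_true]
  constructor
  · rintro ⟨v, hv', h1⟩
    rw [hv, List.mem_map] at hv'
    rcases hv' with ⟨⟨k, w⟩, hmem, rfl⟩
    refine ⟨k, by rw [hk]; exact List.mem_map.mpr ⟨(k, w), hmem, rfl⟩, ?_⟩
    rw [PySem.Dict.getD_of_mem_items d hmem hn 0]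
    simpa using h1
  · rintro ⟨k, hk', h1⟩
    rw [hk, List.mem_map] at hk'
    rcases hk' with ⟨⟨k', w⟩, hmem, hfst⟩
    cases hfst
    have := PySem.Dict.getD_of_mem_items d hmem hn 0
    refine ⟨w, ?_, ?_⟩
    · rw [hv]; exact List.mem_map.mpr ⟨(k', w), hmem, rfl⟩
    · rw [this] at h1; simpa using h1

-- getD of B's weighted counting fold
theorem pv_getD_runFold (v : Int) : ∀ (l : List (Int × Nat)) (c : PySem.Dict Int Int),
    ((l.foldl (fun c r => c.insert r.1 (c.getD r.1 0 + ((r.2 : Int) - 1))) c).getD v 0)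
      = c.getD v 0 + ((l.filter (fun r => r.1 == v)).map (fun r => ((r.2 : Int) - 1))).sum := by
  intro l
  induction l with
  | nil => simp
  | cons r l' ih =>
    intro c
    rw [List.foldl_cons, ih, PySem.Dict.getD_insert]
    by_cases h : v = r.1
    · simp [h]; ring
    · simp [h, Ne.symm h]

-- count of a flatMap of replicates
theorem pv_count_flatMap (k : Int) : ∀ (l : List (Int × Nat)),
    List.count k (l.flatMap (fun r => List.replicate (r.2 - 1) r.1))
      = (l.map (fun r => if r.1 == k then r.2 - 1 else 0)).sum := by
  intro l
  induction l with
  | nil => simp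
  | cons r l' ih =>
    simp only [List.flatMap_cons, List.count_append, List.map_cons, List.sum_cons, ih,
      List.count_replicate]

-- the weighted sum over the runs B keeps equals the total matched-pair count
theorem pv_sum_eq (k : Int) : ∀ (l : List (Int × Nat)), (∀ r ∈ l, 1 ≤ r.2) →
    (((l.filter (fun r => decide (1 < r.2))).filter (fun r => r.1 == k)).map
        (fun r => ((r.2 : Int) - 1))).sum
      = ((l.map (fun r => if r.1 == k then r.2 - 1 else 0)).sum : Nat) := by
  intro l
  induction l with
  | nil => simp
  | cons r l' ih =>
    intro h
    have h1 : 1 ≤ r.2 := h r (by simp)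
    have ih' := ih (fun x hx => h x (by simp [hx]))
    rw [List.map_cons, List.sum_cons, List.filter_cons]
    by_cases hb : 1 < r.2
    · rw [if_pos (show (decide (1 < r.2)) = true by simpa using hb), List.filter_cons]
      by_cases hk : (r.1 == k) = true
      · rw [if_pos hk, List.map_cons, List.sum_cons, ih', if_pos hk]
        push_cast
        omega
      · rw [if_neg (by simp_all), ih', if_neg (by simp_all)]
        push_cast
        ring
    · rw [if_neg (by simpa using hb), ih']
      have h2 : r.2 = 1 := by omega
      by_cases hk : (r.1 == k) = true
      · rw [if_pos hk, h2]
        push_cast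
        ring
      · rw [if_neg (by simp_all)]
        push_cast
        ring

-- A's dict loop, characterised: the result is "some digit has exactly one matched pair"
theorem pv_A_core (d : List Int) :
  ((((PySem.List.enumerate (PySem.List.slice d (some 1) none) 0).foldl
      (fun (c : PySem.Dict Int Int) (p : Int × Int) =>
        if p.2 == PySem.List.pyGetD d p.1 0 then
          if c.contains p.2 then c.insert p.2 (c.getD p.2 0 + 1) else c.insert p.2 1
        else c)
      PySem.Dict.empty).values.map (fun x => x == 1)).any id) = true
    ↔ ∃ k : Int, (pvMatched d).count k = 1 := by
  rw [PySem.List.slice_from_one]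
  have h0 := pv_foldl_enum (fun (c : PySem.Dict Int Int) b => if c.contains b then c.insert b (c.getD b 0 + 1) else c.insert b 1) d 0 d (by simp) PySem.Dict.empty
  simp only [Nat.cast_zero] at h0
  rw [h0]
  have hfun : (fun (c : PySem.Dict Int Int) (q : Int × Int) =>
        if q.2 == q.1 then (if c.contains q.2 then c.insert q.2 (c.getD q.2 0 + 1) else c.insert q.2 1) else c)
      = (fun (c : PySem.Dict Int Int) (q : Int × Int) =>
        if q.2 == q.1 then c.insert q.2 (c.getD q.2 0 + 1) else c) := by
    funext c q
    by_cases h1 : (q.2 == q.1) = true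
    · simp only [h1, if_true]
      by_cases h2 : c.contains q.2 = true
      · simp [h2]
      · rw [if_neg (by simp [h2]), PySem.Dict.getD_of_not_contains c 0 (by simpa using h2)]
        norm_num
    · simp [h1]
  rw [hfun]
  have hm : (d.zip d.tail).foldl
        (fun (c : PySem.Dict Int Int) (q : Int × Int) => if q.2 == q.1 then c.insert q.2 (c.getD q.2 0 + 1) else c)
        PySem.Dict.empty
      = (pvMatched d).foldl (fun c x => c.insert x (c.getD x 0 + 1)) PySem.Dict.empty := by
    rw [pvMatched, List.foldl_map, List.foldl_filter]
  rw [hm, PySem.Dict.foldl_insert_getD_add_one_eq_counter]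
  rw [List.any_map, show (id ∘ fun (x:Int) => x == 1) = (fun (v:Int) => v == 1) from rfl]
  rw [pv_any_values _ (PySem.Dict.nodup_keys_counter _)]
  constructor
  · rintro ⟨k, _, h1⟩
    refine ⟨k, ?_⟩
    rw [PySem.Dict.getD_counter] at h1
    exact_mod_cast h1
  · rintro ⟨k, h1⟩
    refine ⟨k, ?_, ?_⟩
    · rw [PySem.Dict.keys_counter, PySem.Set.mem_ofList]
      exact List.count_pos_iff.mp (by omega)
    · rw [PySem.Dict.getD_counter, h1]; rfl

-- B's run loop, characterised the same way
theorem pv_B_core (d : List Int) :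
    (((pvRuns d).foldl
        (fun (c : PySem.Dict Int Int) (r : Int × Nat) =>
          if r.2 > 1 then c.insert r.1 (c.getD r.1 0 + ((r.2 : Int) - 1)) else c)
        PySem.Dict.empty).values.any (fun v => v == 1)) = true
      ↔ ∃ k : Int, (pvMatched d).count k = 1 := by
  have hstep : (fun (c : PySem.Dict Int Int) (r : Int × Nat) =>
        if r.2 > 1 then c.insert r.1 (c.getD r.1 0 + ((r.2 : Int) - 1)) else c)
      = (fun (c : PySem.Dict Int Int) (r : Int × Nat) =>
        if (decide (1 < r.2)) = true then c.insert r.1 (c.getD r.1 0 + ((r.2 : Int) - 1)) else c) := by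
    funext c r; simp
  rw [hstep, ← List.foldl_filter]
  set big := (pvRuns d).filter (fun r => decide (1 < r.2)) with hbig
  have hkeys : ((big.foldl (fun (c : PySem.Dict Int Int) (r : Int × Nat) =>
        c.insert r.1 (c.getD r.1 0 + ((r.2 : Int) - 1))) PySem.Dict.empty).keys)
      = PySem.Set.update (PySem.Dict.empty (κ := Int) (ν := Int)).keys (big.map Prod.fst) :=
    PySem.Dict.keys_foldl_insert_key big Prod.fst _ _
  have hnodup : ((big.foldl (fun (c : PySem.Dict Int Int) (r : Int × Nat) =>
        c.insert r.1 (c.getD r.1 0 + ((r.2 : Int) - 1))) PySem.Dict.empty).keys).Nodup := by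
    rw [hkeys]
    exact PySem.Set.nodup_update _ _ (by simp [PySem.Dict.keys_empty])
  rw [pv_any_values _ hnodup]
  have hgetD : ∀ k : Int, ((big.foldl (fun (c : PySem.Dict Int Int) (r : Int × Nat) =>
        c.insert r.1 (c.getD r.1 0 + ((r.2 : Int) - 1))) PySem.Dict.empty).getD k 0)
      = (((pvMatched d).count k : Int)) := by
    intro k
    rw [pv_getD_runFold k big PySem.Dict.empty, PySem.Dict.getD_empty]
    rw [pv_matched_runs d, pv_count_flatMap k (pvRuns d)]
    rw [hbig, pv_sum_eq k (pvRuns d) (pvRuns_pos d)]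
    simp
  constructor
  · rintro ⟨k, _, h1⟩
    rw [hgetD k] at h1
    exact ⟨k, by exact_mod_cast h1⟩
  · rintro ⟨k, h1⟩
    refine ⟨k, ?_, by rw [hgetD k]; exact_mod_cast h1⟩
    rw [hkeys, PySem.Set.mem_update]
    right
    have hne : big.filter (fun r => r.1 == k) ≠ [] := by
      intro hnil
      have := hgetD k
      rw [pv_getD_runFold k big PySem.Dict.empty, PySem.Dict.getD_empty, hnil] at this
      simp at this
      omega
    rcases List.exists_mem_of_ne_nil _ hne with ⟨r, hr⟩
    have hr2 := List.mem_filter.mp hr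
    exact List.mem_map.mpr ⟨r, hr2.1, by simpa using hr2.2⟩

theorem adjacentpair_eq_exists (n : Int) :
    adjacentpair n = true ↔ ∃ k : Int, (pvMatched (pvDigits n)).count k = 1 :=
  pv_A_core (pvDigits n)

theorem adjacentpair_alt_eq_exists (n : Int) :
    adjacentpair_alt n = true ↔ ∃ k : Int, (pvMatched (pvDigits n)).count k = 1 :=
  pv_B_core (pvDigits n)

-- ===== VERDICT (by name: the statement is the Claim_ definition above) =====
theorem adjacentpair_spec : Claim_equal_adjacentpair := by
  intro n _ _
  unfold Spec_adjacentpair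
  exact Bool.coe_iff_coe.mp
    ((adjacentpair_eq_exists n).trans (adjacentpair_alt_eq_exists n).symm)
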